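-- pv_equiv track=rewrite | github.com/FlorentMZL/TSP | logistique_dernier_km.py | parcoursPrefixe
-- ===== SOURCE A (Python) =====
-- def parcoursPrefixe(arbre) :
--     if len(arbre) == 0 :
--         return []
--     copiearbre=[]
--     for i in range(len(arbre)) :
--         copiearbre.append(arbre[i])
--     parcours = []
--     stack =[]
--     stack.append(copiearbre[0])
--     (debut,fin,poids) = copiearbre[0]
--     stack.append(debut)
--     stack.append(fin)
--     parcours.append(debut)
--     parcours.append(fin)
--     removelist = [copiearbre[0]] #Liste des sommets à enlever. On les enleve à chaque itération du while et pas pendant car on en a besoin tout au long de l'execution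
--
--
--     while(len(stack)!=0):
--         copiearbre = [x for x in copiearbre if x not in removelist]
--         debut = stack.pop()
--
--         for i in range(len(copiearbre))  :
--             #On regarde si le début ou la fin (car le graphe n'est pas orienté) d'un des arcs du sommet courant va vers un autre sommet de l'arbre.
--             if copiearbre[i][0] == debut :
--                 stack.append(copiearbre[i][1])
--                 parcours.append(copiearbre[i][1])
--                 removelist.append(copiearbre[i])
--
--             elif copiearbre[i][1] == debut :
--                 stack.append(copiearbre[i][0])
--                 removelist.append(copiearbre[i])
--                 parcours.append(copiearbre[i][0])
--     for i in range(len(parcours)) :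
--         if parcours[i] == 0 :
--             parcoursReturn = parcours[i:]+parcours[:i]
--             break
--
--     return parcoursReturn
-- ===== SOURCE B (Python) =====
-- def parcoursPrefixe(arbre):
--     if len(arbre) == 0:
--         return []
--     # adjacency index built once: vertex -> list of (edge id, other endpoint) in edge order
--     adj = {}
--     for i, (a, b, w) in enumerate(arbre):
--         adj.setdefault(a, []).append((i, b))
--         if b != a:
--             adj.setdefault(b, []).append((i, a))
--     (a0, b0, w0) = arbre[0]
--     used = {0}
--     parcours = [a0, b0]
--     stack = [a0, b0]
--     while stack:
--         v = stack.pop()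
--         for i, u in adj.get(v, []):
--             if i not in used:
--                 used.add(i)
--                 stack.append(u)
--                 parcours.append(u)
--     k = parcours.index(0)
--     return parcours[k:] + parcours[:k]
-- ===== Notes on version B (the rewrite author's own statement) =====
-- stated objective: faster
-- what changed: A rescans the whole shrinking edge list (and refilters it against a growing removelist) at every stack pop; B builds a vertex->(edge id, neighbour) adjacency dict once and runs the same push-order DFS over it with an id 'used' set, then rotates via parcours.index(0) instead of an index scan.
-- outside the precondition, e.g. on parcoursPrefixe([(0, 1, 5), (0, 1, 5)]): A returns [0, 1], B returns [0, 1, 0]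
import Mathlib
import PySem

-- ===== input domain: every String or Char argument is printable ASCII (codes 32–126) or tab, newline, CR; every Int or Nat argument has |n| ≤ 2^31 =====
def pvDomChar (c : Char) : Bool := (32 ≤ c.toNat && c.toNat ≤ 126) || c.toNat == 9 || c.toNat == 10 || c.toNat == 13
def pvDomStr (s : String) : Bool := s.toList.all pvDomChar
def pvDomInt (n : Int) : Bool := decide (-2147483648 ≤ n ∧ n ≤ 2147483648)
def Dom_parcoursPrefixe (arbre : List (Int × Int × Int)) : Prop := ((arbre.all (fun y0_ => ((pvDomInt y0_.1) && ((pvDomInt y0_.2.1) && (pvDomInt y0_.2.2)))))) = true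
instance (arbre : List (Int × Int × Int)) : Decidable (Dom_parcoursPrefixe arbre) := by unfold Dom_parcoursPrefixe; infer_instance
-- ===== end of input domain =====

-- B replaces A's repeated full-list rescans and removelist refiltering by a one-time adjacency
-- index (dict) and an id-marking DFS over it; measurably faster, same return value on Pre_.


-- ===== PORT A =====
-- Python's stack holds both the first edge (a 3-tuple) and vertices (ints); 'tuple == int' is False.
inductive PItem where
  | edge (e : Int × Int × Int)
  | node (v : Int)
deriving DecidableEq, Repr

-- one iteration of A's inner 'for i in range(len(copiearbre))' body (branches in Python's order;
-- when debut is the tuple both '==' tests are False)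
def aStep (debut : PItem) (st : List PItem × List Int × List (Int × Int × Int))
    (e : Int × Int × Int) : List PItem × List Int × List (Int × Int × Int) :=
  match debut with
  | .edge _ => st
  | .node v =>
    if e.1 = v then (PItem.node e.2.1 :: st.1, st.2.1 ++ [e.2.1], st.2.2 ++ [e])
    else if e.2.1 = v then (PItem.node e.1 :: st.1, st.2.1 ++ [e.1], st.2.2 ++ [e])
    else st

-- A's while loop; the stack is kept top-at-head (Python appends/pops at the tail).
-- Fuel: each iteration pops one item; at most len(arbre)+3 items are ever pushed, so
-- fuel len(arbre)+3 never runs out (established by the proofs below).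
def aLoop : Nat → List (Int × Int × Int) → List (Int × Int × Int) → List PItem → List Int → List Int
  | 0, _, _, _, parcours => parcours
  | fuel+1, copiearbre, removelist, stack, parcours =>
    match stack with
    | [] => parcours
    | debut :: rest =>
      let ca := copiearbre.filter (fun x => !(removelist.contains x))  -- [x for x in copiearbre if x not in removelist]
      let st := ca.foldl (aStep debut) (rest, parcours, removelist)
      aLoop fuel ca st.2.2 st.1 st.2.1

-- A's final 'for i in range(len(parcours)): if parcours[i] == 0: ... break'; acc is parcours[:i]
def aRot (acc : List Int) : List Int → Option (List Int)
  | [] => none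
  | x :: xs => if x = 0 then some ((x :: xs) ++ acc) else aRot (acc ++ [x]) xs

def parcoursPrefixe (arbre : List (Int × Int × Int)) : List Int :=
  match arbre with
  | [] => []
  | e0 :: _ =>
    -- copiearbre: elementwise copy of arbre (immutable here)
    let parcours := aLoop (arbre.length + 3) arbre [e0]
      [PItem.node e0.2.1, PItem.node e0.1, PItem.edge e0] [e0.1, e0.2.1]
    match aRot [] parcours with
    | some r => r
    | none => []  -- Python: NameError (parcoursReturn unbound); such inputs are outside Pre_

-- ===== PORT B =====
-- adj.setdefault(a, []).append((i, b)); if b != a: adj.setdefault(b, []).append((i, a))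
def adjStep (d : PySem.Dict Int (List (Int × Int))) (ie : Int × (Int × Int × Int)) :
    PySem.Dict Int (List (Int × Int)) :=
  let d1 := d.insert ie.2.1 (d.getD ie.2.1 [] ++ [(ie.1, ie.2.2.1)])
  if ie.2.2.1 ≠ ie.2.1 then d1.insert ie.2.2.1 (d1.getD ie.2.2.1 [] ++ [(ie.1, ie.2.1)]) else d1

-- B's while loop (stack top-at-head); fuel len(arbre)+2 never runs out
def bLoop : Nat → PySem.Dict Int (List (Int × Int)) → PySem.Set Int → List Int → List Int → List Int
  | 0, _, _, _, parcours => parcours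
  | fuel+1, adj, used, stack, parcours =>
    match stack with
    | [] => parcours
    | v :: rest =>
      let st := (adj.getD v []).foldl
        (fun st iu => if PySem.Set.contains st.2.2 iu.1 then st
                      else (iu.2 :: st.1, st.2.1 ++ [iu.2], PySem.Set.add st.2.2 iu.1))
        (rest, parcours, used)
      bLoop fuel adj st.2.2 st.1 st.2.1

def parcoursPrefixe_alt (arbre : List (Int × Int × Int)) : List Int :=
  match arbre with
  | [] => []
  | e0 :: _ =>
    let adj := (PySem.List.enumerate arbre 0).foldl adjStep PySem.Dict.empty
    let used : PySem.Set Int := PySem.Set.add PySem.Set.empty 0   -- used = {0}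
    let parcours := bLoop (arbre.length + 2) adj used [e0.2.1, e0.1] [e0.1, e0.2.1]
    match PySem.List.index? parcours 0 with
    | some k => PySem.List.slice parcours (some (k : Int)) none
                  ++ PySem.List.slice parcours none (some (k : Int))
    | none => []  -- Python: ValueError from parcours.index(0); unreachable under Pre_

-- ===== PRECONDITION & SPEC =====
-- saturation of the vertex set reachable from the first edge's endpoints
def growStep (s : PySem.Set Int) (e : Int × Int × Int) : PySem.Set Int :=
  if s.contains e.1 || s.contains e.2.1 then PySem.Set.add (PySem.Set.add s e.1) e.2.1 else s

def reachSet (arbre : List (Int × Int × Int)) : PySem.Set Int :=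
  match arbre with
  | [] => PySem.Set.empty
  | e0 :: _ => (List.range (2 * arbre.length)).foldl (fun s _ => arbre.foldl growStep s)
      (PySem.Set.add (PySem.Set.add PySem.Set.empty e0.1) e0.2.1)

-- Pre_ excludes (a) inputs where A raises NameError because vertex 0 is not in the connected
-- component of the first edge, and (b) inputs whose first edge reappears later in the list, where
-- A's wholesale removal of all tuples equal to the first edge is an accident of its removelist.
def Pre_parcoursPrefixe (arbre : List (Int × Int × Int)) : Prop :=
  (match arbre with
   | [] => true
   | e0 :: t => !t.contains e0 && (reachSet arbre).contains 0) = true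

instance (arbre : List (Int × Int × Int)) : Decidable (Pre_parcoursPrefixe arbre) := by
  unfold Pre_parcoursPrefixe; infer_instance

def pvWitness_parcoursPrefixe : (List (Int × Int × Int)) := [(1, 0, 2), (1, 2, 3), (2, 3, 1)]

def Spec_parcoursPrefixe (arbre : List (Int × Int × Int)) (out : List Int) : Prop := out = parcoursPrefixe_alt arbre
instance (arbre : List (Int × Int × Int)) (out : List Int) : Decidable (Spec_parcoursPrefixe arbre out) := by unfold Spec_parcoursPrefixe; infer_instance

-- ===== CLAIM (what is proved, stated in full; the proofs are below) =====
def Claim_equal_parcoursPrefixe : Prop := ∀ (arbre : List (Int × Int × Int)), Dom_parcoursPrefixe arbre → Pre_parcoursPrefixe arbre → Spec_parcoursPrefixe arbre (parcoursPrefixe arbre)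

-- ===== LEMMAS AND PROOFS =====

-- the vertex A pushes for edge e when the popped item is vertex v (none = neither branch fires)
def other (e : Int × Int × Int) (v : Int) : Option Int :=
  if e.1 = v then some e.2.1 else if e.2.1 = v then some e.1 else none

-- adjacency entries contributed by an enumerated edge list, for key v
def entriesOf (l : List (Int × (Int × Int × Int))) (v : Int) : List (Int × Int) :=
  l.filterMap (fun ie => (other ie.2 v).map (fun u => (ie.1, u)))

-- the not-yet-used enumerated edges
def Rrem (arbre : List (Int × Int × Int)) (used : PySem.Set Int) :
    List (Int × (Int × Int × Int)) :=
  (PySem.List.enumerate arbre 0).filter (fun ie => !(PySem.Set.contains used ie.1))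

theorem aLoop_nil (f : Nat) (ca rl : List (Int × Int × Int)) (p : List Int) :
    aLoop f ca rl [] p = p := by
  cases f <;> rfl

theorem aFold_edge (rem : List (Int × Int × Int)) (e : Int × Int × Int)
    (st : List PItem × List Int × List (Int × Int × Int)) :
    rem.foldl (aStep (.edge e)) st = st := by
  induction rem generalizing st with
  | nil => rfl
  | cons x t ih => simpa [aStep] using ih st

theorem aFold_node (rem : List (Int × Int × Int)) (v : Int) (rest : List PItem)
    (p : List Int) (rl : List (Int × Int × Int)) :
    rem.foldl (aStep (.node v)) (rest, p, rl)
      = (((rem.filterMap (fun e => other e v)).map PItem.node).reverse ++ rest,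
         p ++ rem.filterMap (fun e => other e v),
         rl ++ rem.filter (fun e => (other e v).isSome)) := by
  induction rem generalizing rest p rl with
  | nil => simp
  | cons e t ih =>
    simp only [List.foldl_cons, aStep, other]
    split_ifs with h1 h2 <;>
      simp [ih, other, h1, *, List.filterMap_cons, List.filter_cons, List.append_assoc]

theorem length_filter_not {α : Type} (l : List α) (p : α → Bool) :
    (l.filter p).length + (l.filter (fun a => !(p a))).length = l.length := by
  induction l with
  | nil => rfl
  | cons x t ih =>
    by_cases h : p x = true <;> simp [List.filter_cons, h, ← ih] <;> omega

theorem bFold (entries : List (Int × Int)) (used : PySem.Set Int) (rest p : List Int)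
    (hnd : (entries.map (fun x => x.1)).Nodup) :
    entries.foldl
      (fun st iu => if PySem.Set.contains st.2.2 iu.1 then st
                    else (iu.2 :: st.1, st.2.1 ++ [iu.2], PySem.Set.add st.2.2 iu.1))
      (rest, p, used)
    = (((entries.filter (fun iu => !(PySem.Set.contains used iu.1))).map (fun x => x.2)).reverse ++ rest,
       p ++ (entries.filter (fun iu => !(PySem.Set.contains used iu.1))).map (fun x => x.2),
       used ++ (entries.filter (fun iu => !(PySem.Set.contains used iu.1))).map (fun x => x.1)) := by
  induction entries generalizing used rest p with
  | nil => simp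
  | cons iu t ih =>
    simp only [List.map_cons, List.nodup_cons] at hnd
    obtain ⟨hni, hndt⟩ := hnd
    by_cases h : PySem.Set.contains used iu.1 = true
    · have hmem : iu.1 ∈ used := by
        simpa [PySem.Set.contains, List.contains_eq_mem] using h
      rw [List.foldl_cons, if_pos h, ih used rest p hndt]
      simp [List.filter_cons, hmem]
    · have hmem : iu.1 ∉ used := by
        simpa [PySem.Set.contains, List.contains_eq_mem] using h
      have hadd : PySem.Set.add used iu.1 = used ++ [iu.1] := by
        simp [PySem.Set.add, PySem.Set.contains, List.contains_eq_mem, hmem]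
      rw [List.foldl_cons, if_neg h, ih (PySem.Set.add used iu.1) (iu.2 :: rest) (p ++ [iu.2]) hndt]
      have hfilt : t.filter (fun x => !(PySem.Set.contains (PySem.Set.add used iu.1) x.1))
                 = t.filter (fun x => !(PySem.Set.contains used x.1)) := by
        apply List.filter_congr
        intro x hx
        have hne : x.1 ≠ iu.1 := by
          intro he
          exact hni (he ▸ List.mem_map_of_mem hx)
        simp [hadd, PySem.Set.contains, List.contains_eq_mem, List.mem_append, hne]
      rw [hfilt, hadd]
      simp [List.filter_cons, hmem, List.append_assoc]

theorem adj_getD_fold (l : List (Int × (Int × Int × Int)))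
    (d : PySem.Dict Int (List (Int × Int))) (v : Int) :
    (l.foldl adjStep d).getD v [] = d.getD v [] ++ entriesOf l v := by
  induction l generalizing d with
  | nil => simp [entriesOf]
  | cons ie t ih =>
    rw [List.foldl_cons, ih]
    have hstep : (adjStep d ie).getD v [] = d.getD v [] ++ entriesOf [ie] v := by
      obtain ⟨i, a, b, w⟩ := ie
      simp only [adjStep, entriesOf, List.filterMap_cons, List.filterMap_nil, other]
      by_cases hba : b = a
      · rw [if_neg (fun hcon => hcon hba), PySem.Dict.getD_insert]
        by_cases hva : v = a
        · rw [if_pos hva]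
          simp [hva]
        · rw [if_neg hva]
          have h5 : ¬ (a = v) := fun hcon => hva hcon.symm
          have h6 : ¬ (b = v) := fun hcon => hva ((hba.symm.trans hcon).symm)
          simp [h5, h6]
      · rw [if_pos hba, PySem.Dict.getD_insert]
        by_cases hvb : v = b
        · rw [if_pos hvb, PySem.Dict.getD_insert, if_neg hba]
          have hab : ¬ (a = b) := fun hcon => hba hcon.symm
          simp [hvb, hab]
        · rw [if_neg hvb, PySem.Dict.getD_insert]
          by_cases hva : v = a
          · rw [if_pos hva]
            simp [hva]
          · rw [if_neg hva]
            have h5 : ¬ (a = v) := fun hcon => hva hcon.symm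
            have h6 : ¬ (b = v) := fun hcon => hvb hcon.symm
            simp [h5, h6]
    rw [hstep]
    simp only [entriesOf]
    cases h : other ie.2 v <;> simp [List.filterMap_cons, h]

theorem entriesOf_filter (l : List (Int × (Int × Int × Int))) (v : Int) (used : PySem.Set Int) :
    (entriesOf l v).filter (fun iu => !(PySem.Set.contains used iu.1))
      = entriesOf (l.filter (fun ie => !(PySem.Set.contains used ie.1))) v := by
  induction l with
  | nil => simp [entriesOf]
  | cons ie t ih =>
    simp only [entriesOf, List.filterMap_cons, List.filter_cons, PySem.Set.contains,
      List.contains_eq_mem] at *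
    by_cases hq : ie.1 ∈ used <;>
      cases h : other ie.2 v <;>
        simp [h, hq, ih, List.filter_cons]

theorem entriesOf_map_snd (l : List (Int × (Int × Int × Int))) (v : Int) :
    (entriesOf l v).map (fun x => x.2) = (l.map (fun x => x.2)).filterMap (fun e => other e v) := by
  induction l with
  | nil => rfl
  | cons ie t ih =>
    simp only [entriesOf, List.filterMap_cons, List.map_cons] at *
    cases h : other ie.2 v <;> simp [h, ih]

theorem entriesOf_map_fst (l : List (Int × (Int × Int × Int))) (v : Int) :
    (entriesOf l v).map (fun x => x.1)
      = (l.filter (fun ie => (other ie.2 v).isSome)).map (fun x => x.1) := by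
  induction l with
  | nil => rfl
  | cons ie t ih =>
    simp only [entriesOf, List.filterMap_cons, List.filter_cons] at *
    cases h : other ie.2 v <;> simp [h, ih]

theorem mem_fst_filter (l : List (Int × (Int × Int × Int))) (q : Int × (Int × Int × Int) → Bool)
    (hl : l.Pairwise (fun a b => a.1 ≠ b.1)) (ie : Int × (Int × Int × Int)) (hie : ie ∈ l) :
    ie.1 ∈ (l.filter q).map (fun x => x.1) ↔ q ie = true := by
  induction l with
  | nil => cases hie
  | cons je t ih =>
    rw [List.pairwise_cons] at hl
    obtain ⟨hhd, htl⟩ := hl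
    rcases List.mem_cons.mp hie with rfl | hmem
    · constructor
      · intro h
        by_cases hq : q ie = true
        · exact hq
        · exfalso
          rw [List.filter_cons, if_neg (by simpa using hq)] at h
          obtain ⟨x, hx, hx1⟩ := List.mem_map.mp h
          exact hhd x (List.mem_of_mem_filter hx) hx1.symm
      · intro hq
        rw [List.filter_cons, if_pos (by simpa using hq)]
        simp
    · have hne : je.1 ≠ ie.1 := hhd ie hmem
      rw [List.filter_cons]
      by_cases hq : q je = true
      · rw [if_pos (by simpa using hq)]
        simp only [List.map_cons, List.mem_cons]
        constructor
        · rintro (h | h)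
          · exact absurd h.symm hne
          · exact (ih htl hmem).mp h
        · intro h
          exact Or.inr ((ih htl hmem).mpr h)
      · rw [if_neg (by simpa using hq)]
        exact ih htl hmem

theorem pairwise_ne_R (arbre : List (Int × Int × Int)) (used : PySem.Set Int) :
    (Rrem arbre used).Pairwise (fun a b => a.1 ≠ b.1) := by
  have h := PySem.List.pairwise_lt_enumerate arbre (0 : Int)
  have h2 : (Rrem arbre used).Pairwise (fun a b => a.1 < b.1) :=
    List.Pairwise.sublist List.filter_sublist h
  exact h2.imp (fun hlt => ne_of_lt hlt)

theorem nodup_fst_entries (arbre : List (Int × Int × Int)) (v : Int) :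
    ((entriesOf (PySem.List.enumerate arbre 0) v).map (fun x => x.1)).Nodup := by
  rw [entriesOf_map_fst]
  have h := PySem.List.pairwise_lt_enumerate arbre (0 : Int)
  have h2 : ((PySem.List.enumerate arbre 0).filter
      (fun ie => (other ie.2 v).isSome)).Pairwise (fun a b => a.1 < b.1) :=
    List.Pairwise.sublist List.filter_sublist h
  have h3 : (((PySem.List.enumerate arbre 0).filter
      (fun ie => (other ie.2 v).isSome)).map (fun x => x.1)).Pairwise
      (fun a b : Int => a < b) := List.pairwise_map.mpr h2
  exact h3.imp (fun hlt => ne_of_lt hlt)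

theorem mainLemma (arbre : List (Int × Int × Int)) (e0 : Int × Int × Int) (fa : Nat) :
    ∀ (fb : Nat) (used : PySem.Set Int) (bstack p : List Int) (ca rl : List (Int × Int × Int)),
    ca.filter (fun x => !(rl.contains x)) = (Rrem arbre used).map (fun x => x.2) →
    bstack.length + (Rrem arbre used).length + 2 ≤ fa →
    bstack.length + (Rrem arbre used).length + 1 ≤ fb →
    aLoop fa ca rl (bstack.map PItem.node ++ [PItem.edge e0]) p
      = bLoop fb ((PySem.List.enumerate arbre 0).foldl adjStep PySem.Dict.empty) used bstack p := by
  induction fa with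
  | zero => intro fb used bstack p ca rl _ hfa _; omega
  | succ fa ih =>
    intro fb used bstack p ca rl hinv hfa hfb
    obtain ⟨fb', rfl⟩ : ∃ fb', fb = fb' + 1 := ⟨fb - 1, by omega⟩
    cases bstack with
    | nil =>
      simp only [List.map_nil, List.nil_append, aLoop, bLoop]
      rw [aFold_edge]
      exact aLoop_nil fa _ _ _
    | cons v rest =>
      simp only [List.map_cons, List.cons_append, aLoop, bLoop]
      rw [hinv, aFold_node]
      have hadj : ((PySem.List.enumerate arbre 0).foldl adjStep PySem.Dict.empty).getD v []
          = entriesOf (PySem.List.enumerate arbre 0) v := by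
        rw [adj_getD_fold]
        simp [PySem.Dict.getD_empty]
      rw [hadj, bFold _ used rest p (nodup_fst_entries arbre v)]
      have hkept : (entriesOf (PySem.List.enumerate arbre 0) v).filter
            (fun iu => !(PySem.Set.contains used iu.1)) = entriesOf (Rrem arbre used) v := by
        rw [entriesOf_filter]
        rfl
      rw [hkept, entriesOf_map_snd]
      -- abbreviations
      set R := Rrem arbre used with hRdef
      set news := (R.map (fun x => x.2)).filterMap (fun e => other e v) with hnews
      set kids := (entriesOf R v).map (fun x => x.1) with hkids
      -- the new invariant
      have hrlmem : ∀ x ∈ R.map (fun y => y.2), rl.contains x = false := by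
        intro x hx
        rw [← hinv] at hx
        have := List.of_mem_filter hx
        simpa using this
      have hA : (R.map (fun x => x.2)).filter
            (fun x => !((rl ++ (R.map (fun y => y.2)).filter (fun e => (other e v).isSome)).contains x))
          = (R.map (fun x => x.2)).filter (fun x => !((other x v).isSome)) := by
        apply List.filter_congr
        intro x hx
        have hrl := hrlmem x hx
        have hm : ((R.map (fun y => y.2)).filter (fun e => (other e v).isSome)).contains x
            = (other x v).isSome := by
          by_cases hs : (other x v).isSome = true
          · have : x ∈ (R.map (fun y => y.2)).filter (fun e => (other e v).isSome) :=
              List.mem_filter.mpr ⟨hx, hs⟩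
            simp [List.contains_eq_mem, this, hs]
          · have hnm : x ∉ (R.map (fun y => y.2)).filter (fun e => (other e v).isSome) :=
              fun hmem => hs (List.mem_filter.mp hmem).2
            have hnone : other x v = none := Option.not_isSome_iff_eq_none.mp (by simpa using hs)
            simp [List.contains_eq_mem, hnm, hnone]
        have hcat : ((rl ++ (R.map (fun y => y.2)).filter (fun e => (other e v).isSome)).contains x)
            = (rl.contains x || ((R.map (fun y => y.2)).filter (fun e => (other e v).isSome)).contains x) := by
          by_cases h1 : x ∈ rl <;>
            by_cases h2 : x ∈ (R.map (fun y => y.2)).filter (fun e => (other e v).isSome) <;>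
              simp [List.contains_eq_mem, List.mem_append, h1, h2]
        rw [hcat, hrl, hm]
        simp
      have hB : Rrem arbre (used ++ kids) = R.filter (fun ie => !((other ie.2 v).isSome)) := by
        have h1 : Rrem arbre (used ++ kids) = R.filter (fun ie => !(List.contains kids ie.1)) := by
          rw [hRdef]
          unfold Rrem
          rw [List.filter_filter]
          apply List.filter_congr
          intro ie _
          by_cases h1 : ie.1 ∈ used <;>
            by_cases h2 : ie.1 ∈ kids <;>
              simp [PySem.Set.contains, List.contains_eq_mem, List.mem_append, h1, h2]
        have h2 : R.filter (fun ie => !(List.contains kids ie.1))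
            = R.filter (fun ie => !((other ie.2 v).isSome)) := by
          apply List.filter_congr
          intro ie hie
          have hk : ie.1 ∈ (R.filter (fun je => (other je.2 v).isSome)).map (fun x => x.1)
              ↔ ((fun je => (other je.2 v).isSome) ie = true) :=
            mem_fst_filter R _ (pairwise_ne_R arbre used) ie hie
          rw [hkids, entriesOf_map_fst]
          by_cases hs : (other ie.2 v).isSome = true
          · have hmm : ie.1 ∈ (R.filter (fun je => (other je.2 v).isSome)).map (fun x => x.1) :=
              hk.mpr (by simpa using hs)
            simp [List.contains_eq_mem, hmm, hs]
          · have hnm : ie.1 ∉ (R.filter (fun je => (other je.2 v).isSome)).map (fun x => x.1) := by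
              intro hmem
              exact hs (hk.mp hmem)
            have hnone : other ie.2 v = none := Option.not_isSome_iff_eq_none.mp (by simpa using hs)
            simp [List.contains_eq_mem, hnm, hnone]
        exact h1.trans h2
      have hC : (R.map (fun x => x.2)).filter (fun x => !((other x v).isSome))
          = (R.filter (fun ie => !((other ie.2 v).isSome))).map (fun x => x.2) := by
        rw [List.filter_map]
        rfl
      have hinv' : ((R.map (fun x => x.2)).filter
            (fun x => !((rl ++ (R.map (fun y => y.2)).filter (fun e => (other e v).isSome)).contains x)))
          = (Rrem arbre (used ++ kids)).map (fun x => x.2) := by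
        rw [hA, hC, hB]
      -- lengths
      have hlenk : news.length = (R.filter (fun ie => (other ie.2 v).isSome)).length := by
        rw [hnews, ← entriesOf_map_snd]
        have := congrArg List.length (entriesOf_map_fst R v)
        simpa using this
      have hsplit := length_filter_not R (fun ie => (other ie.2 v).isSome)
      have hlenR' : (Rrem arbre (used ++ kids)).length
          = (R.filter (fun ie => !((other ie.2 v).isSome))).length := congrArg List.length hB
      -- assemble the two recursive calls
      have hstk : ((news.map PItem.node).reverse ++ (rest.map PItem.node ++ [PItem.edge e0]))
          = ((news.reverse ++ rest).map PItem.node ++ [PItem.edge e0]) := by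
        simp [List.map_append, List.map_reverse, List.append_assoc]
      rw [hstk]
      exact ih fb' (used ++ kids) (news.reverse ++ rest) (p ++ news)
        (R.map (fun x => x.2)) (rl ++ (R.map (fun y => y.2)).filter (fun e => (other e v).isSome))
        hinv'
        (by simp only [List.length_append, List.length_reverse, List.length_cons] at hfa ⊢; omega)
        (by simp only [List.length_append, List.length_reverse, List.length_cons] at hfb ⊢; omega)

theorem aRot_spec (p acc : List Int) :
    aRot acc p = (PySem.List.index? p 0).map (fun k => p.drop k ++ (acc ++ p.take k)) := by
  induction p generalizing acc with
  | nil => simp [aRot, PySem.List.index?]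
  | cons x xs ih =>
    by_cases hx : x = 0
    · subst hx
      rw [PySem.List.index?_cons_self]
      simp [aRot]
    · simp only [aRot, if_neg hx]
      rw [ih, PySem.List.index?_cons_of_ne xs hx]
      cases PySem.List.index? xs 0 <;>
        simp [List.drop_succ_cons, List.take_succ_cons, List.append_assoc]

-- ===== VERDICT (by name: the statement is the Claim_ definition above) =====
theorem parcoursPrefixe_spec : Claim_equal_parcoursPrefixe := by
  unfold Claim_equal_parcoursPrefixe
  intro arbre _hdom hpre
  unfold Spec_parcoursPrefixe
  cases arbre with
  | nil => rfl
  | cons e0 t =>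
    unfold Pre_parcoursPrefixe at hpre
    simp only [Bool.and_eq_true, Bool.not_eq_true'] at hpre
    have hnotin : e0 ∉ t := by
      intro hmem
      have h := hpre.1
      simp [List.contains_eq_mem, hmem] at h
    have husedinit : (PySem.Set.add PySem.Set.empty (0 : Int)) = [0] := rfl
    have hR0 : Rrem (e0 :: t) (PySem.Set.add PySem.Set.empty (0 : Int))
        = PySem.List.enumerate t 1 := by
      rw [husedinit]
      unfold Rrem
      rw [PySem.List.enumerate_cons, List.filter_cons]
      rw [if_neg (by simp [PySem.Set.contains])]
      apply List.filter_eq_self.mpr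
      intro ie hie
      obtain ⟨k, hk, hp⟩ := (PySem.List.mem_enumerate_iff t 1 ie).mp hie
      subst hp
      simp [PySem.Set.contains, List.contains_eq_mem]
      omega
    have hinv0 : (e0 :: t).filter (fun x => !(([e0] : List (Int × Int × Int)).contains x))
        = (Rrem (e0 :: t) (PySem.Set.add PySem.Set.empty (0 : Int))).map (fun x => x.2) := by
      rw [hR0, PySem.List.map_snd_enumerate, List.filter_cons]
      rw [if_neg (by simp)]
      apply List.filter_eq_self.mpr
      intro x hx
      have hne : x ≠ e0 := fun he => hnotin (he ▸ hx)
      simp [List.contains_eq_mem, hne]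
    have hlenR : (Rrem (e0 :: t) (PySem.Set.add PySem.Set.empty (0 : Int))).length = t.length := by
      rw [hR0]
      exact PySem.List.length_enumerate t 1
    have hmain := mainLemma (e0 :: t) e0 ((e0 :: t).length + 3) ((e0 :: t).length + 2)
      (PySem.Set.add PySem.Set.empty (0 : Int)) [e0.2.1, e0.1] [e0.1, e0.2.1] (e0 :: t) [e0]
      hinv0
      (by simp only [List.length_cons, List.length_nil, hlenR]; omega)
      (by simp only [List.length_cons, List.length_nil, hlenR]; omega)
    have hstack0 : (([e0.2.1, e0.1] : List Int).map PItem.node ++ [PItem.edge e0])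
        = [PItem.node e0.2.1, PItem.node e0.1, PItem.edge e0] := rfl
    rw [hstack0] at hmain
    show parcoursPrefixe (e0 :: t) = parcoursPrefixe_alt (e0 :: t)
    unfold parcoursPrefixe parcoursPrefixe_alt
    simp only []
    rw [hmain, aRot_spec]
    cases hP : PySem.List.index?
        (bLoop ((e0 :: t).length + 2)
          ((PySem.List.enumerate (e0 :: t) 0).foldl adjStep PySem.Dict.empty)
          (PySem.Set.add PySem.Set.empty 0) [e0.2.1, e0.1] [e0.1, e0.2.1]) 0 with
    | none => simp [hP]
    | some k =>
      simp [hP, PySem.List.slice_from_natCast, PySem.List.slice_to_natCast]
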